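-- pv_equiv track=rewrite | github.com/sakamo-wni/MobileCommentGenerator | src/nodes/output_node.py | _analyze_weather_pattern
-- ===== SOURCE A (Python) =====
-- from typing import Dict, Any, List, Optional
--
-- def _analyze_weather_pattern(forecasts: List[Dict[str, Any]]) -> str:
--     """天気パターンを分析
--
--     Args:
--         forecasts: 予報データのリスト
--
--     Returns:
--         天気パターンの説明
--     """
--     if not forecasts:
--         return "データなし"
--
--     weather_conditions = [f["weather"] for f in forecasts if f["weather"]]
--
--     # 悪天候の検出
--     severe_conditions = ["大雨", "嵐", "雷", "豪雨", "暴風", "台風"]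
--     rain_conditions = ["雨", "小雨", "中雨"]
--
--     has_severe = any(any(severe in weather for severe in severe_conditions) for weather in weather_conditions)
--     has_rain = any(any(rain in weather for rain in rain_conditions) for weather in weather_conditions)
--
--     if has_severe:
--         return "悪天候注意"
--     elif has_rain:
--         return "雨天続く"
--     elif len(set(weather_conditions)) <= 2:
--         return "安定した天気"
--     else:
--         return "変わりやすい天気"
-- ===== SOURCE B (Python) =====
-- from typing import Dict, Any, List
--
-- _SEVERE = ("大雨", "嵐", "雷", "豪雨", "暴風", "台風")
-- _RAIN = ("雨", "小雨", "中雨")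
--
-- def _severity(w: str) -> int:
--     """Map one weather condition to a severity rank: 2 severe, 1 rainy, 0 calm."""
--     if any(k in w for k in _SEVERE):
--         return 2
--     if any(k in w for k in _RAIN):
--         return 1
--     return 0
--
-- def _analyze_weather_pattern(forecasts: List[Dict[str, Any]]) -> str:
--     """Rank-based: classify each condition into a severity rank, keep the running
--     maximum (short-circuiting as soon as rank 2 is seen), then decide from the
--     maximum rank; the distinct-condition count resolves the calm case."""
--     if not forecasts:
--         return "データなし"
--     best = 0
--     seen = set()
--     for f in forecasts:
--         w = f["weather"]
--         if not w:
--             continue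
--         seen.add(w)
--         r = _severity(w)
--         if r == 2:
--             return "悪天候注意"  # rank 2 dominates every later observation
--         if r > best:
--             best = r
--     if best == 1:
--         return "雨天続く"
--     return "安定した天気" if len(seen) <= 2 else "変わりやすい天気"
-- ===== Notes on version B (the rewrite author's own statement) =====
-- stated objective: alternative
-- what changed: Replaces A's two independent any()-over-list boolean scans plus decision ladder with a rank lattice: each condition is classified once into a severity rank (2 severe / 1 rain / 0 calm), a single loop keeps the running maximum and short-circuits the whole function as soon as rank 2 appears, and the verdict is read off the maximum rank.
-- outside the precondition, e.g. on _analyze_weather_pattern([{}]): A raises KeyError, B raises KeyError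
import Mathlib
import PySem

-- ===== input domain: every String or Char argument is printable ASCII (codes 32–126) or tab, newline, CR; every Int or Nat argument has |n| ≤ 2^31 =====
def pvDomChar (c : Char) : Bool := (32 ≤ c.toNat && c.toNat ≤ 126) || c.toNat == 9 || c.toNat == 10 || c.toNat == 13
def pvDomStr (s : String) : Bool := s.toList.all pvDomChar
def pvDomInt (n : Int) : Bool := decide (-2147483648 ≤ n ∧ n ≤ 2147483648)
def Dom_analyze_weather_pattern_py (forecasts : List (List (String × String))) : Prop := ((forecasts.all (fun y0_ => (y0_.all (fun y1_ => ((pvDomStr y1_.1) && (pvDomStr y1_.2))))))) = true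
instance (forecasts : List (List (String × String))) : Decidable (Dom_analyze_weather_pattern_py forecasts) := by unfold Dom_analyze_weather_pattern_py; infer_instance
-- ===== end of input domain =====

-- B replaces A's two boolean any() scans with a per-condition severity rank (2/1/0), a running maximum
-- with short-circuit on rank 2, and a verdict read off the maximum (objective: alternative, same cost).
-- ===== PORT A =====
-- f["weather"] : dict access, first match; Pre_ guarantees the key is present (else Python raises KeyError)
def pvGetWeather (f : List (String × String)) : String :=
  (PySem.Dict.get? (PySem.Dict.mk f) "weather").getD ""

def pvSevereConditions : List String := ["大雨", "嵐", "雷", "豪雨", "暴風", "台風"]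
def pvRainConditions : List String := ["雨", "小雨", "中雨"]

def analyze_weather_pattern_py (forecasts : List (List (String × String))) : String :=
  if forecasts = [] then "データなし"
  else
    let weather_conditions := (forecasts.map pvGetWeather).filter (fun w => !(w == ""))
    let has_severe := weather_conditions.any (fun weather => pvSevereConditions.any (fun severe => PySem.Str.isIn severe weather))
    let has_rain := weather_conditions.any (fun weather => pvRainConditions.any (fun rain => PySem.Str.isIn rain weather))
    if has_severe then "悪天候注意"
    else if has_rain then "雨天続く"
    else if PySem.Set.len (PySem.Set.ofList weather_conditions) ≤ 2 then "安定した天気"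
    else "変わりやすい天気"

-- ===== PORT B =====
-- _severity(w): rank 2 severe, 1 rainy, 0 calm (same keyword tuples as A)
def pvSeverity (w : String) : Int :=
  if pvSevereConditions.any (fun k => PySem.Str.isIn k w) then 2
  else if pvRainConditions.any (fun k => PySem.Str.isIn k w) then 1
  else 0

-- the for-loop of B with its early return ('return 悪天候注意' inside the loop) and the epilogue
def pvLoopB : List (List (String × String)) → Int → PySem.Set String → String
  | [], best, seen =>
      if best == 1 then "雨天続く"
      else if PySem.Set.len seen ≤ 2 then "安定した天気"
      else "変わりやすい天気"
  | f :: rest, best, seen =>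
      let w := pvGetWeather f
      if w == "" then pvLoopB rest best seen
      else
        let seen' := PySem.Set.add seen w
        let r := pvSeverity w
        if r == 2 then "悪天候注意"
        else pvLoopB rest (if r > best then r else best) seen'

def analyze_weather_pattern_py_alt (forecasts : List (List (String × String))) : String :=
  if forecasts = [] then "データなし"
  else pvLoopB forecasts 0 PySem.Set.empty

-- ===== PRECONDITION & SPEC =====
-- Pre_ excludes forecasts missing the "weather" key, on which Python A (and B) raise KeyError.
def Pre_analyze_weather_pattern_py (forecasts : List (List (String × String))) : Prop :=
  (forecasts.all (fun f => PySem.Dict.contains (PySem.Dict.mk f) "weather")) = true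
instance (forecasts : List (List (String × String))) : Decidable (Pre_analyze_weather_pattern_py forecasts) := by unfold Pre_analyze_weather_pattern_py; infer_instance

def pvWitness_analyze_weather_pattern_py : (List (List (String × String))) :=
  [[("weather", "rain")], [("weather", "")]]

def Spec_analyze_weather_pattern_py (forecasts : List (List (String × String))) (out : String) : Prop := out = analyze_weather_pattern_py_alt forecasts
instance (forecasts : List (List (String × String))) (out : String) : Decidable (Spec_analyze_weather_pattern_py forecasts out) := by unfold Spec_analyze_weather_pattern_py; infer_instance

-- ===== CLAIM (what is proved, stated in full; the proofs are below) =====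
def Claim_equal_analyze_weather_pattern_py : Prop := ∀ (forecasts : List (List (String × String))), Dom_analyze_weather_pattern_py forecasts → Pre_analyze_weather_pattern_py forecasts → Spec_analyze_weather_pattern_py forecasts (analyze_weather_pattern_py forecasts)

-- ===== LEMMAS AND PROOFS =====

-- A's filtered condition list
def pvConds (fs : List (List (String × String))) : List String :=
  (fs.map pvGetWeather).filter (fun w => !(w == ""))

-- invariant of B's loop, for the reachable accumulator values best ∈ {0,1}
theorem pvLoopB_inv (fs : List (List (String × String))) :
    ∀ (best : Int) (seen : PySem.Set String), (best = 0 ∨ best = 1) →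
    pvLoopB fs best seen =
      (if (pvConds fs).any (fun w => pvSevereConditions.any (fun k => PySem.Str.isIn k w)) then "悪天候注意"
       else if (best == 1) || (pvConds fs).any (fun w => pvRainConditions.any (fun k => PySem.Str.isIn k w)) then "雨天続く"
       else if PySem.Set.len ((pvConds fs).foldl PySem.Set.add seen) ≤ 2 then "安定した天気"
       else "変わりやすい天気") := by
  induction fs with
  | nil => intro best seen _; simp [pvLoopB, pvConds]
  | cons f rest ih =>
    intro best seen hb
    cases hwE : (pvGetWeather f == "") with
    | true =>
      have hconds : pvConds (f :: rest) = pvConds rest := by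
        simp only [pvConds, List.map_cons, List.filter_cons, hwE, Bool.not_true]
        rfl
      have hstep : pvLoopB (f :: rest) best seen = pvLoopB rest best seen := by
        simp only [pvLoopB, hwE, if_true]
      rw [hstep, ih best seen hb, hconds]
    | false =>
      have hconds : pvConds (f :: rest) = pvGetWeather f :: pvConds rest := by
        simp only [pvConds, List.map_cons, List.filter_cons, hwE, Bool.not_false, if_true]
      cases hs : (pvSevereConditions.any (fun k => PySem.Str.isIn k (pvGetWeather f))) with
      | true =>
        have hstep : pvLoopB (f :: rest) best seen = "悪天候注意" := by
          simp only [pvLoopB, hwE, Bool.false_eq_true, if_false, pvSeverity, hs, if_true]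
          rfl
        rw [hstep, hconds]
        simp only [List.any_cons, hs, Bool.true_or, if_true]
      | false =>
        cases hr : (pvRainConditions.any (fun k => PySem.Str.isIn k (pvGetWeather f))) with
        | true =>
          have hrk : pvSeverity (pvGetWeather f) = 1 := by
            simp only [pvSeverity, hs, Bool.false_eq_true, if_false, hr, if_true]
          have hstep : pvLoopB (f :: rest) best seen =
              pvLoopB rest 1 (PySem.Set.add seen (pvGetWeather f)) := by
            rcases hb with h | h <;> subst h <;> simp [pvLoopB, hwE, hrk]
          rw [hstep, ih 1 _ (Or.inr rfl), hconds]
          simp only [List.any_cons, hs, hr, Bool.false_or, Bool.or_true, beq_self_eq_true,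
            Bool.true_or, if_true]
        | false =>
          have hrk : pvSeverity (pvGetWeather f) = 0 := by
            simp only [pvSeverity, hs, Bool.false_eq_true, if_false, hr]
          have hstep : pvLoopB (f :: rest) best seen =
              pvLoopB rest best (PySem.Set.add seen (pvGetWeather f)) := by
            rcases hb with h | h <;> subst h <;> simp [pvLoopB, hwE, hrk]
          rw [hstep, ih best _ hb, hconds]
          simp only [List.any_cons, hs, Bool.false_or, hr, List.foldl_cons]
          rfl

-- ===== VERDICT (by name: the statement is the Claim_ definition above) =====
theorem analyze_weather_pattern_py_spec : Claim_equal_analyze_weather_pattern_py := by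
  intro forecasts _ _
  unfold Spec_analyze_weather_pattern_py analyze_weather_pattern_py analyze_weather_pattern_py_alt
  by_cases h : forecasts = []
  · simp [h]
  · simp only [h, if_false]
    rw [pvLoopB_inv forecasts 0 PySem.Set.empty (Or.inl rfl)]
    simp [pvConds, PySem.Set.ofList_eq_foldl, PySem.Set.empty]
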